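-- pv_equiv track=rewrite | github.com/evanzhangxin/codesuggester | test/test_performance.py | generate_large_code
-- ===== SOURCE A (Python) =====
-- def generate_large_code(num_classes=10, num_methods_per_class=10) -> str:
--     """Generate large Python code for testing."""
--     code_lines = [
--         "import os",
--         "import sys",
--         "import json",
--         "import collections",
--         "from typing import List, Dict, Optional, Union",
--         "",
--     ]
--
--     for class_idx in range(num_classes):
--         code_lines.append(f"class TestClass{class_idx}:")
--         code_lines.append(f'    """Test class {class_idx} for performance testing."""')
--         code_lines.append("")
--         code_lines.append("    def __init__(self):")
--         code_lines.append(f"        self.class_id = {class_idx}")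
--         code_lines.append("        self.data = {}")
--         code_lines.append("")
--
--         for method_idx in range(num_methods_per_class):
--             code_lines.append(f"    def method_{method_idx}(self, param1, param2=None):")
--             code_lines.append(f'        """Method {method_idx} implementation."""')
--             code_lines.append(f"        result = param1 + {method_idx}")
--             code_lines.append("        if param2:")
--             code_lines.append("            result += param2")
--             code_lines.append("        self.data[f'method_{method_idx}'] = result")
--             code_lines.append("        return result")
--             code_lines.append("")
--
--         code_lines.append("")
--
--     # Add some functions
--     for func_idx in range(5):
--         code_lines.append(f"def global_function_{func_idx}(arg1, arg2, *args, **kwargs):")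
--         code_lines.append(f'    """Global function {func_idx}."""')
--         code_lines.append(f"    return arg1 + arg2 + {func_idx}")
--         code_lines.append("")
--
--     return "\n".join(code_lines)
-- ===== SOURCE B (Python) =====
-- # B: assemble the source from per-block string templates (header, class, function
-- # blocks) joined with "\n", instead of appending lines one by one.
--
-- _HEADER = (
--     "import os\n"
--     "import sys\n"
--     "import json\n"
--     "import collections\n"
--     "from typing import List, Dict, Optional, Union\n"
-- )
--
--
-- def _method_block(m):
--     return (
--         f"    def method_{m}(self, param1, param2=None):\n"
--         f'        """Method {m} implementation."""\n'
--         f"        result = param1 + {m}\n"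
--         "        if param2:\n"
--         "            result += param2\n"
--         "        self.data[f'method_{method_idx}'] = result\n"
--         "        return result\n"
--     )
--
--
-- def _class_block(c, num_methods):
--     head = (
--         f"class TestClass{c}:\n"
--         f'    """Test class {c} for performance testing."""\n'
--         "\n"
--         "    def __init__(self):\n"
--         f"        self.class_id = {c}\n"
--         "        self.data = {}\n"
--     )
--     methods = "".join("\n" + _method_block(m) for m in range(num_methods))
--     return head + methods + "\n"
--
--
-- def _function_block(f):
--     return (
--         f"def global_function_{f}(arg1, arg2, *args, **kwargs):\n"
--         f'    """Global function {f}."""\n'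
--         f"    return arg1 + arg2 + {f}\n"
--     )
--
--
-- def generate_large_code(num_classes=10, num_methods_per_class=10) -> str:
--     blocks = [_HEADER]
--     blocks += [_class_block(c, num_methods_per_class) for c in range(num_classes)]
--     blocks += [_function_block(f) for f in range(5)]
--     return "\n".join(blocks)
-- ===== Notes on version B (the rewrite author's own statement) =====
-- stated objective: idiomatic
-- what changed: B assembles the source from whole-block string templates (header block, one template per class embedding its method templates, function blocks) joined with newlines, instead of A's per-line appends to a list of lines.
import Mathlib
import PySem

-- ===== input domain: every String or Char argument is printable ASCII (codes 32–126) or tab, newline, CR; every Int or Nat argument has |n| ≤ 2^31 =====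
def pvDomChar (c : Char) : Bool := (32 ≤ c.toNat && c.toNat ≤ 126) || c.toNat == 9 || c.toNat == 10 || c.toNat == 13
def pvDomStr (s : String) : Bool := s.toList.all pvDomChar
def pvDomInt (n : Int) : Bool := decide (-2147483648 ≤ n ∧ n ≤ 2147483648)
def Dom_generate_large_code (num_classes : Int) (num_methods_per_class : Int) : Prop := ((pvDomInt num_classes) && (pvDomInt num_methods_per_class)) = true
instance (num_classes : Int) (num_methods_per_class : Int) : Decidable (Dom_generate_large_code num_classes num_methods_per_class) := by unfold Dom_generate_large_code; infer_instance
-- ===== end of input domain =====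

-- B builds the source from whole-block string templates joined with "\n" instead of
-- appending the file line by line; same return value, different decomposition.

-- ===== PORT A =====
def generate_large_code (num_classes : Int) (num_methods_per_class : Int) : String :=
  let code_lines : List String :=
    ["import os", "import sys", "import json", "import collections",
     "from typing import List, Dict, Optional, Union", ""]
  let code_lines := (PySem.List.pyRange 0 num_classes 1).foldl (fun acc class_idx =>
    let acc := acc ++ ["class TestClass" ++ PySem.Int.toStr class_idx ++ ":",
      "    \"\"\"Test class " ++ PySem.Int.toStr class_idx ++ " for performance testing.\"\"\"",
      "",
      "    def __init__(self):",
      "        self.class_id = " ++ PySem.Int.toStr class_idx,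
      "        self.data = {}",
      ""]
    let acc := (PySem.List.pyRange 0 num_methods_per_class 1).foldl (fun acc2 method_idx =>
      acc2 ++ ["    def method_" ++ PySem.Int.toStr method_idx ++ "(self, param1, param2=None):",
        "        \"\"\"Method " ++ PySem.Int.toStr method_idx ++ " implementation.\"\"\"",
        "        result = param1 + " ++ PySem.Int.toStr method_idx,
        "        if param2:",
        "            result += param2",
        "        self.data[f'method_{method_idx}'] = result",
        "        return result",
        ""]) acc
    acc ++ [""]) code_lines
  let code_lines := (PySem.List.pyRange 0 5 1).foldl (fun acc func_idx =>
    acc ++ ["def global_function_" ++ PySem.Int.toStr func_idx ++ "(arg1, arg2, *args, **kwargs):",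
      "    \"\"\"Global function " ++ PySem.Int.toStr func_idx ++ ".\"\"\"",
      "    return arg1 + arg2 + " ++ PySem.Int.toStr func_idx,
      ""]) code_lines
  PySem.Str.join "\n" code_lines

-- ===== PORT B =====
def pvHeaderBlock : String :=
  "import os\n" ++
  "import sys\n" ++
  "import json\n" ++
  "import collections\n" ++
  "from typing import List, Dict, Optional, Union\n"

def pvMethodBlock (m : Int) : String :=
  "    def method_" ++ PySem.Int.toStr m ++ "(self, param1, param2=None):\n" ++
  "        \"\"\"Method " ++ PySem.Int.toStr m ++ " implementation.\"\"\"\n" ++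
  "        result = param1 + " ++ PySem.Int.toStr m ++ "\n" ++
  "        if param2:\n" ++
  "            result += param2\n" ++
  "        self.data[f'method_{method_idx}'] = result\n" ++
  "        return result\n"

def pvClassBlock (c : Int) (num_methods : Int) : String :=
  let head :=
    "class TestClass" ++ PySem.Int.toStr c ++ ":\n" ++
    "    \"\"\"Test class " ++ PySem.Int.toStr c ++ " for performance testing.\"\"\"\n" ++
    "\n" ++
    "    def __init__(self):\n" ++
    "        self.class_id = " ++ PySem.Int.toStr c ++ "\n" ++
    "        self.data = {}\n"
  let methods := PySem.Str.join ""
    ((PySem.List.pyRange 0 num_methods 1).map (fun m => "\n" ++ pvMethodBlock m))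
  head ++ methods ++ "\n"

def pvFunctionBlock (f : Int) : String :=
  "def global_function_" ++ PySem.Int.toStr f ++ "(arg1, arg2, *args, **kwargs):\n" ++
  "    \"\"\"Global function " ++ PySem.Int.toStr f ++ ".\"\"\"\n" ++
  "    return arg1 + arg2 + " ++ PySem.Int.toStr f ++ "\n"

def generate_large_code_alt (num_classes : Int) (num_methods_per_class : Int) : String :=
  let blocks := [pvHeaderBlock]
    ++ (PySem.List.pyRange 0 num_classes 1).map (fun c => pvClassBlock c num_methods_per_class)
    ++ (PySem.List.pyRange 0 5 1).map pvFunctionBlock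
  PySem.Str.join "\n" blocks

-- ===== PRECONDITION & SPEC =====
def Spec_generate_large_code (num_classes : Int) (num_methods_per_class : Int) (out : String) : Prop := out = generate_large_code_alt num_classes num_methods_per_class
instance (num_classes : Int) (num_methods_per_class : Int) (out : String) : Decidable (Spec_generate_large_code num_classes num_methods_per_class out) := by unfold Spec_generate_large_code; infer_instance

-- ===== CLAIM (what is proved, stated in full; the proofs are below) =====
def Claim_equal_generate_large_code : Prop := ∀ (num_classes : Int) (num_methods_per_class : Int), Dom_generate_large_code num_classes num_methods_per_class → Spec_generate_large_code num_classes num_methods_per_class (generate_large_code num_classes num_methods_per_class)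

-- ===== LEMMAS AND PROOFS =====

-- A's line groups, named for the proofs.
def pvHdrLines : List String :=
  ["import os", "import sys", "import json", "import collections",
   "from typing import List, Dict, Optional, Union", ""]

def pvMLines (i : Int) : List String :=
  ["    def method_" ++ PySem.Int.toStr i ++ "(self, param1, param2=None):",
   "        \"\"\"Method " ++ PySem.Int.toStr i ++ " implementation.\"\"\"",
   "        result = param1 + " ++ PySem.Int.toStr i,
   "        if param2:",
   "            result += param2",
   "        self.data[f'method_{method_idx}'] = result",
   "        return result",
   ""]

def pvCHead (c : Int) : List String :=
  ["class TestClass" ++ PySem.Int.toStr c ++ ":",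
   "    \"\"\"Test class " ++ PySem.Int.toStr c ++ " for performance testing.\"\"\"",
   "",
   "    def __init__(self):",
   "        self.class_id = " ++ PySem.Int.toStr c,
   "        self.data = {}",
   ""]

def pvCLines (c : Int) (m : Int) : List String :=
  pvCHead c ++ (PySem.List.pyRange 0 m 1).flatMap pvMLines ++ [""]

def pvFLines (i : Int) : List String :=
  ["def global_function_" ++ PySem.Int.toStr i ++ "(arg1, arg2, *args, **kwargs):",
   "    \"\"\"Global function " ++ PySem.Int.toStr i ++ ".\"\"\"",
   "    return arg1 + arg2 + " ++ PySem.Int.toStr i,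
   ""]

-- String-level facts about PySem.Str.join.
theorem pvJoin_singleton (s x : String) : PySem.Str.join s [x] = x := by
  simp [PySem.Str.join, PySem.Chars.join, List.intercalate]

theorem pvJoin_cons_cons (s x y : String) (t : List String) :
    PySem.Str.join s (x :: y :: t) = x ++ s ++ PySem.Str.join s (y :: t) := by
  simp [PySem.Str.join, PySem.Chars.join, List.intercalate, String.append_assoc]

theorem pvJoin_cons_ne (s x : String) (t : List String) (h : t ≠ []) :
    PySem.Str.join s (x :: t) = x ++ s ++ PySem.Str.join s t := by
  cases t with
  | nil => exact absurd rfl h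
  | cons y t => exact pvJoin_cons_cons s x y t

theorem pvJoin_empty_cons (x : String) (t : List String) :
    PySem.Str.join "" (x :: t) = x ++ PySem.Str.join "" t := by
  cases t with
  | nil => simp [PySem.Str.join, PySem.Chars.join, List.intercalate]
  | cons y t => simpa using pvJoin_cons_cons "" x y t

theorem pvJoin_append (xs ys : List String) (hx : xs ≠ []) (hy : ys ≠ []) :
    PySem.Str.join "\n" (xs ++ ys) =
      PySem.Str.join "\n" xs ++ "\n" ++ PySem.Str.join "\n" ys := by
  induction xs with
  | nil => exact absurd rfl hx
  | cons x xs ih =>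
    cases xs with
    | nil =>
      cases ys with
      | nil => exact absurd rfl hy
      | cons y t => simp [pvJoin_cons_cons, pvJoin_singleton]
    | cons x' xs' =>
      have h1 : (x' :: xs') ++ ys ≠ [] := by simp
      rw [List.cons_append, pvJoin_cons_ne _ _ _ h1, pvJoin_cons_cons,
        ih (by simp)]
      simp [String.append_assoc]

-- one method's lines joined = the method template
theorem pvMB (i : Int) : PySem.Str.join "\n" (pvMLines i) = pvMethodBlock i := by
  simp only [pvMLines, pvMethodBlock, pvJoin_cons_cons, pvJoin_singleton, String.append_assoc]
  rfl

theorem pvCH (c : Int) :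
    PySem.Str.join "\n" (pvCHead c) =
      "class TestClass" ++ PySem.Int.toStr c ++ ":\n" ++
      "    \"\"\"Test class " ++ PySem.Int.toStr c ++ " for performance testing.\"\"\"\n" ++
      "\n" ++
      "    def __init__(self):\n" ++
      "        self.class_id = " ++ PySem.Int.toStr c ++ "\n" ++
      "        self.data = {}\n" := by
  simp only [pvCHead, pvJoin_cons_cons, pvJoin_singleton, String.append_assoc]
  rfl

-- joined method lines (with the class's closing blank line) = concatenated method templates
theorem pvMethTail (ms : List Int) :
    "\n" ++ PySem.Str.join "\n" (ms.flatMap pvMLines ++ [""]) =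
      PySem.Str.join "" (ms.map (fun i => "\n" ++ pvMethodBlock i)) ++ "\n" := by
  induction ms with
  | nil => simp [PySem.Str.join, PySem.Chars.join, List.intercalate]
  | cons i ms ih =>
    have h1 : ms.flatMap pvMLines ++ [""] ≠ [] := by simp
    rw [List.flatMap_cons, List.append_assoc,
      pvJoin_append (pvMLines i) _ (by simp [pvMLines]) h1, pvMB,
      List.map_cons, pvJoin_empty_cons]
    rw [String.append_assoc, String.append_assoc, ih]
    all_goals simp only [String.append_assoc]

-- one class's lines joined = the class template
theorem pvCB (c m : Int) :
    PySem.Str.join "\n" (pvCLines c m) = pvClassBlock c m := by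
  have h1 : (PySem.List.pyRange 0 m 1).flatMap pvMLines ++ [""] ≠ [] := by simp
  rw [pvCLines, List.append_assoc,
    pvJoin_append (pvCHead c) _ (by simp [pvCHead]) h1]
  rw [pvClassBlock, String.append_assoc, String.append_assoc,
    pvMethTail (PySem.List.pyRange 0 m 1)]
  rw [← pvCH c]

theorem pvR5 : PySem.List.pyRange 0 5 1 = [0, 1, 2, 3, 4] := by decide

theorem pvFF_ne : (PySem.List.pyRange 0 5 1).flatMap pvFLines ≠ [] := by
  rw [pvR5]; simp [pvFLines]

theorem pvFB_ne : (PySem.List.pyRange 0 5 1).map pvFunctionBlock ≠ [] := by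
  rw [pvR5]; simp

-- one global function's lines joined = the function template
theorem pvFBjoin (i : Int) : PySem.Str.join "\n" (pvFLines i) = pvFunctionBlock i := by
  simp only [pvFLines, pvFunctionBlock, pvJoin_cons_cons, pvJoin_singleton, String.append_assoc]
  rfl

theorem pvFuncs (fs : List Int) (h : fs ≠ []) :
    PySem.Str.join "\n" (fs.flatMap pvFLines) =
      PySem.Str.join "\n" (fs.map pvFunctionBlock) := by
  induction fs with
  | nil => exact absurd rfl h
  | cons f fs ih =>
    cases fs with
    | nil => simp [pvJoin_singleton, pvFBjoin]
    | cons f' fs' =>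
      rw [List.flatMap_cons, List.map_cons,
        pvJoin_append (pvFLines f) _ (by simp [pvFLines]) (by simp [pvFLines]),
        pvFBjoin, pvJoin_cons_ne _ _ _ (by simp), ih (by simp)]

-- the class blocks together with the five function blocks
theorem pvClasses (m : Int) (cs : List Int) :
    PySem.Str.join "\n" (cs.flatMap (fun c => pvCLines c m) ++
        (PySem.List.pyRange 0 5 1).flatMap pvFLines) =
      PySem.Str.join "\n" (cs.map (fun c => pvClassBlock c m) ++
        (PySem.List.pyRange 0 5 1).map pvFunctionBlock) := by
  induction cs with
  | nil =>
    simp only [List.flatMap_nil, List.map_nil, List.nil_append]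
    exact pvFuncs _ (by rw [pvR5]; simp)
  | cons c cs ih =>
    have h1 : cs.flatMap (fun c => pvCLines c m) ++
        (PySem.List.pyRange 0 5 1).flatMap pvFLines ≠ [] :=
      fun h => pvFF_ne (List.append_eq_nil_iff.mp h).2
    have h2 : cs.map (fun c => pvClassBlock c m) ++
        (PySem.List.pyRange 0 5 1).map pvFunctionBlock ≠ [] :=
      fun h => pvFB_ne (List.append_eq_nil_iff.mp h).2
    rw [List.flatMap_cons, List.map_cons, List.cons_append, List.append_assoc,
      pvJoin_append (pvCLines c m) _ (by simp [pvCLines, pvCHead]) h1,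
      pvCB, pvJoin_cons_ne _ _ _ h2, ih]

-- A's fold produces exactly the flattened line groups
theorem pvAShape (n m : Int) :
    generate_large_code n m =
      PySem.Str.join "\n" (pvHdrLines ++
        (PySem.List.pyRange 0 n 1).flatMap (fun c => pvCLines c m) ++
        (PySem.List.pyRange 0 5 1).flatMap pvFLines) := by
  unfold generate_large_code
  simp only [PySem.List.foldl_append_eq_flatMap, List.append_assoc]
  rfl

theorem pvBShape (n m : Int) :
    generate_large_code_alt n m =
      PySem.Str.join "\n" (pvHeaderBlock ::
        ((PySem.List.pyRange 0 n 1).map (fun c => pvClassBlock c m) ++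
          (PySem.List.pyRange 0 5 1).map pvFunctionBlock)) := rfl

-- ===== VERDICT (by name: the statement is the Claim_ definition above) =====
theorem generate_large_code_spec : Claim_equal_generate_large_code := by
  intro n m _
  show generate_large_code n m = generate_large_code_alt n m
  rw [pvAShape, pvBShape]
  have h1 : (PySem.List.pyRange 0 n 1).flatMap (fun c => pvCLines c m) ++
      (PySem.List.pyRange 0 5 1).flatMap pvFLines ≠ [] :=
    fun h => pvFF_ne (List.append_eq_nil_iff.mp h).2
  have h2 : (PySem.List.pyRange 0 n 1).map (fun c => pvClassBlock c m) ++
      (PySem.List.pyRange 0 5 1).map pvFunctionBlock ≠ [] :=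
    fun h => pvFB_ne (List.append_eq_nil_iff.mp h).2
  rw [List.append_assoc, pvJoin_append pvHdrLines _ (by simp [pvHdrLines]) h1,
    pvJoin_cons_ne _ _ _ h2, pvClasses]
  have hh : PySem.Str.join "\n" pvHdrLines = pvHeaderBlock := by
    simp only [pvHdrLines, pvHeaderBlock, pvJoin_cons_cons, pvJoin_singleton, String.append_assoc]
    rfl
  rw [hh]
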